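-- pv_equiv track=rewrite | github.com/Crypto-TII/claasp | claasp/cipher_modules/models/cp/mzn_models/mzn_hybrid_impossible_xor_differential_model.py | output_is_aligned_with_sboxes
-- ===== SOURCE A (Python) =====
-- def output_is_aligned_with_sboxes(path_indices):
--     for bit_positions in path_indices.values():
--         if len(bit_positions ) <= 1:
--             return True
--
--         lst = sorted(bit_positions)
--         for i in range(len(lst) - 1):
--             if lst[i + 1] - lst[i] != 1:
--                 return False
--     return True
-- ===== SOURCE B (Python) =====
-- def output_is_aligned_with_sboxes(path_indices):
--     for bit_positions in path_indices.values():
--         if len(bit_positions) <= 1: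
--             return True
--         if len(set(bit_positions)) != len(bit_positions):
--             return False
--         if max(bit_positions) - min(bit_positions) != len(bit_positions) - 1:
--             return False
--     return True
-- ===== Notes on version B (the rewrite author's own statement) =====
-- stated objective: simpler
-- what changed: Replaces the per-group sort plus adjacent-difference scan with a distinctness check (len(set)==len) and the arithmetic range test max-min==len-1, which together characterise consecutive integers.
import Mathlib
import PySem

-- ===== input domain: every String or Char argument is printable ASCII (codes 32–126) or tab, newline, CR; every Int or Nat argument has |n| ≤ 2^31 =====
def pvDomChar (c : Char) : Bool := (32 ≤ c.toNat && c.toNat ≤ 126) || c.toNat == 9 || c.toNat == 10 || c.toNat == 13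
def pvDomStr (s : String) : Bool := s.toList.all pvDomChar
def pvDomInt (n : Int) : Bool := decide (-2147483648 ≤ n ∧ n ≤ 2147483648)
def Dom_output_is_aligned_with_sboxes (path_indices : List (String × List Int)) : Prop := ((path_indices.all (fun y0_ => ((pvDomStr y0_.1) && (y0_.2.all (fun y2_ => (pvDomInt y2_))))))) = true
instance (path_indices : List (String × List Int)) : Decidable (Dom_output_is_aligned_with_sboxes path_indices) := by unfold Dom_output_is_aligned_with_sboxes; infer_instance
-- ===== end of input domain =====

-- B replaces A's per-group sort + adjacent-difference scan by a distinctness check plus the range test max - min = len - 1 (simpler per-group test).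


-- ===== PORT A =====
-- inner loop: for i in range(len(lst) - 1): if lst[i + 1] - lst[i] != 1: return False
def pvAInner (lst : List Int) : Bool :=
  (PySem.List.pyRange 0 ((lst.length : Int) - 1) 1).all
    (fun i => PySem.List.pyGetD lst (i + 1) 0 - PySem.List.pyGetD lst i 0 == 1)

-- outer loop over the dict's values, with the early 'return True' on a group of size ≤ 1
def pvALoop : List (String × List Int) → Bool
  | [] => true
  | (_, bp) :: rest =>
    if bp.length ≤ 1 then true
    else if pvAInner (PySem.List.sorted bp (fun x => x) false) then pvALoop rest
    else false

def output_is_aligned_with_sboxes (path_indices : List (String × List Int)) : Bool :=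
  pvALoop path_indices

-- ===== PORT B =====
-- per group: duplicates (len(set) != len) → False; range test max - min != len - 1 → False
def pvBLoop : List (String × List Int) → Bool
  | [] => true
  | (_, bp) :: rest =>
    if bp.length ≤ 1 then true
    else if (PySem.Set.ofList bp).length ≠ bp.length then false
    else if (PySem.List.max? bp (fun x => x)).getD 0 - (PySem.List.min? bp (fun x => x)).getD 0
            ≠ (bp.length : Int) - 1 then false
    else pvBLoop rest

def output_is_aligned_with_sboxes_alt (path_indices : List (String × List Int)) : Bool :=
  pvBLoop path_indices

-- ===== PRECONDITION & SPEC =====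
def Spec_output_is_aligned_with_sboxes (path_indices : List (String × List Int)) (out : Bool) : Prop := out = output_is_aligned_with_sboxes_alt path_indices
instance (path_indices : List (String × List Int)) (out : Bool) : Decidable (Spec_output_is_aligned_with_sboxes path_indices out) := by unfold Spec_output_is_aligned_with_sboxes; infer_instance

-- ===== CLAIM (what is proved, stated in full; the proofs are below) =====
def Claim_equal_output_is_aligned_with_sboxes : Prop := ∀ (path_indices : List (String × List Int)), Dom_output_is_aligned_with_sboxes path_indices → Spec_output_is_aligned_with_sboxes path_indices (output_is_aligned_with_sboxes path_indices)

-- ===== LEMMAS AND PROOFS =====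

-- A's inner scan says: the list is a chain of +1 steps.
lemma pvAInner_iff_chain (lst : List Int) :
    pvAInner lst = true ↔ List.IsChain (fun a b => b = a + 1) lst := by
  unfold pvAInner
  rw [PySem.List.pyRange_one, List.all_map, List.all_eq_true, List.isChain_iff_getElem]
  constructor
  · intro h i hi
    have hk : i ∈ List.range ((((lst.length : Int) - 1) - 0).toNat) := by
      rw [List.mem_range]; omega
    have := h i hk
    simp only [Function.comp] at this
    have e1 : (0 + (i : Int) + 1) = ((i + 1 : Nat) : Int) := by omega
    have e0 : (0 + (i : Int)) = ((i : Nat) : Int) := by omega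
    rw [e1, e0, PySem.List.pyGetD_natCast, PySem.List.pyGetD_natCast] at this
    have g1 : lst.getD (i + 1) 0 = lst[i + 1] := by
      rw [List.getD_eq_getElem?_getD, List.getElem?_eq_getElem hi]; rfl
    have g0 : lst.getD i 0 = lst[i] := by
      rw [List.getD_eq_getElem?_getD, List.getElem?_eq_getElem (by omega)]; rfl
    rw [g1, g0] at this
    have := beq_iff_eq.mp this
    omega
  · intro h i hk
    rw [List.mem_range] at hk
    have hi : i + 1 < lst.length := by omega
    have := h i hi
    simp only [Function.comp]
    have e1 : (0 + (i : Int) + 1) = ((i + 1 : Nat) : Int) := by omega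
    have e0 : (0 + (i : Int)) = ((i : Nat) : Int) := by omega
    rw [e1, e0, PySem.List.pyGetD_natCast, PySem.List.pyGetD_natCast]
    have g1 : lst.getD (i + 1) 0 = lst[i + 1] := by
      rw [List.getD_eq_getElem?_getD, List.getElem?_eq_getElem hi]; rfl
    have g0 : lst.getD i 0 = lst[i] := by
      rw [List.getD_eq_getElem?_getD, List.getElem?_eq_getElem (by omega)]; rfl
    rw [g1, g0]
    exact beq_iff_eq.mpr (by omega)

lemma pv_discard_sublist (s : List Int) (x : Int) : (PySem.Set.discard s x).Sublist s := by
  unfold PySem.Set.discard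
  exact List.filter_sublist

lemma pv_ofList_sublist (xs : List Int) : (PySem.Set.ofList xs).Sublist xs := by
  induction xs with
  | nil => simp [PySem.Set.ofList_nil]
  | cons x t ih =>
    rw [PySem.Set.ofList_cons]
    exact List.Sublist.cons₂ x ((pv_discard_sublist _ x).trans ih)

-- len(set(xs)) == len(xs) is exactly distinctness
lemma pv_ofList_length_iff (xs : List Int) :
    (PySem.Set.ofList xs).length = xs.length ↔ xs.Nodup := by
  constructor
  · intro h
    have := (pv_ofList_sublist xs).eq_of_length h
    rw [← this]; exact PySem.Set.nodup_ofList xs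
  · intro h
    have := PySem.Set.ofList_eq_self_of_nodup xs h
    rw [this]

-- a strictly increasing nonempty list spreads at least its length
lemma pv_pairwise_lt_getLast_ge (a : Int) (t : List Int)
    (h : (a :: t).Pairwise (· < ·)) :
    a + t.length ≤ (a :: t).getLast (by simp) := by
  induction t generalizing a with
  | nil => simp
  | cons b t ih =>
    rw [List.getLast_cons (by simp)]
    have hab : a < b := (List.pairwise_cons.mp h).1 b (by simp)
    have := ih b (List.pairwise_cons.mp h).2
    simp only [List.length_cons]
    push_cast
    omega

lemma pv_chain_getLast (a : Int) (t : List Int)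
    (h : List.IsChain (fun x y => y = x + 1) (a :: t)) :
    (a :: t).getLast (by simp) = a + t.length := by
  induction t generalizing a with
  | nil => simp
  | cons b t ih =>
    rw [List.getLast_cons (by simp)]
    rw [List.isChain_cons_cons] at h
    have := ih b h.2
    simp only [List.length_cons]
    push_cast
    omega

lemma pv_le_getLast (a : Int) (t : List Int) (h : (a :: t).Pairwise (· ≤ ·)) :
    ∀ y ∈ a :: t, y ≤ (a :: t).getLast (by simp) := by
  induction t generalizing a with
  | nil => simp
  | cons b t ih =>
    intro y hy
    rw [List.getLast_cons (by simp)]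
    rcases List.mem_cons.mp hy with rfl | hy'
    · have hab : y ≤ b := (List.pairwise_cons.mp h).1 b (by simp)
      exact le_trans hab (ih b (List.pairwise_cons.mp h).2 b (by simp))
    · exact ih b (List.pairwise_cons.mp h).2 y hy'

-- on a weakly increasing list: consecutive +1 steps ↔ distinct ∧ last - first = length - 1
lemma pv_chain_iff (a : Int) (t : List Int) (hs : (a :: t).Pairwise (· ≤ ·)) :
    List.IsChain (fun x y => y = x + 1) (a :: t) ↔
      (a :: t).Nodup ∧ (a :: t).getLast (by simp) - a = (t.length : Int) := by
  constructor
  · intro h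
    have hlt : List.IsChain (fun x y : Int => x < y) (a :: t) :=
      h.imp (fun {x y} e => by omega)
    have hnd : (a :: t).Nodup := hlt.pairwise.imp (fun {x y} e => ne_of_lt e)
    refine ⟨hnd, ?_⟩
    rw [pv_chain_getLast a t h]; ring
  · rintro ⟨hnd, hlast⟩
    induction t generalizing a with
    | nil => simp
    | cons b t ih =>
      have hplt : (a :: b :: t).Pairwise (· < ·) :=
        (hs.and hnd).imp (fun {x y} e => lt_of_le_of_ne e.1 e.2)
      have hab : a < b := (List.pairwise_cons.mp hplt).1 b (by simp)
      have hge : b + t.length ≤ (b :: t).getLast (by simp) :=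
        pv_pairwise_lt_getLast_ge b t (List.pairwise_cons.mp hplt).2
      rw [List.getLast_cons (by simp)] at hlast
      simp only [List.length_cons] at hlast
      push_cast at hlast
      have hb : b = a + 1 := by omega
      rw [List.isChain_cons_cons]
      refine ⟨hb, ih b (List.pairwise_cons.mp hs).2 (List.nodup_cons.mp hnd).2 ?_⟩
      omega

-- per-group equivalence for groups of size ≥ 2
lemma pv_group_iff (bp : List Int) (h2 : 2 ≤ bp.length) :
    (pvAInner (PySem.List.sorted bp (fun x => x) false) = true) ↔
      ((PySem.Set.ofList bp).length = bp.length ∧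
       (PySem.List.max? bp (fun x => x)).getD 0 - (PySem.List.min? bp (fun x => x)).getD 0
          = (bp.length : Int) - 1) := by
  have hperm : (PySem.List.sorted bp (fun x => x) false).Perm bp := PySem.List.sorted_perm bp (fun x => x) false
  have hpw : (PySem.List.sorted bp (fun x => x) false).Pairwise (· ≤ ·) := by
    have := PySem.List.sorted_pairwise (xs := bp) (key := fun x => x)
    simpa using this
  have hlen : (PySem.List.sorted bp (fun x => x) false).length = bp.length := hperm.length_eq
  have hbpne : bp ≠ [] := by intro h; subst h; simp at h2
  obtain ⟨a, t, hne⟩ : ∃ a t, PySem.List.sorted bp (fun x => x) false = a :: t := by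
    cases h : PySem.List.sorted bp (fun x => x) false with
    | nil => rw [h] at hlen; simp at hlen; omega
    | cons a t => exact ⟨a, t, rfl⟩
  rw [hne] at hperm hpw hlen
  obtain ⟨m, hm⟩ : ∃ m, PySem.List.min? bp (fun x => x) = some m := by
    cases h : PySem.List.min? bp (fun x => x) with
    | none => exact absurd ((PySem.List.min?_eq_none_iff _ _).mp h) hbpne
    | some m => exact ⟨m, rfl⟩
  have hmmem : m ∈ bp := PySem.List.min?_mem hm
  have hmlb : ∀ y ∈ bp, m ≤ y := by
    have := PySem.List.min?_isMin hm
    simpa using this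
  have hamem : a ∈ bp := hperm.mem_iff.mp (by simp)
  have ham : a = m := by
    have h1 : a ≤ m := by
      have := PySem.List.key_head_sorted_le (xs := bp) (key := fun x => x) hne
      simpa using this m hmmem
    have h2 := hmlb a hamem
    omega
  obtain ⟨M, hM⟩ : ∃ M, PySem.List.max? bp (fun x => x) = some M := by
    cases h : PySem.List.max? bp (fun x => x) with
    | none => exact absurd ((PySem.List.max?_eq_none_iff _ _).mp h) hbpne
    | some M => exact ⟨M, rfl⟩
  have hMmem : M ∈ bp := PySem.List.max?_mem hM
  have hMub : ∀ y ∈ bp, y ≤ M := by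
    have := PySem.List.max?_isMax hM
    simpa using this
  have hlastmem : (a :: t).getLast (by simp) ∈ bp := hperm.mem_iff.mp (List.getLast_mem _)
  have hML : M = (a :: t).getLast (by simp) := by
    have h1 : M ≤ (a :: t).getLast (by simp) :=
      pv_le_getLast a t hpw M (hperm.mem_iff.mpr hMmem)
    have h2 := hMub _ hlastmem
    omega
  rw [hne, pvAInner_iff_chain, pv_chain_iff a t hpw, hm, hM]
  simp only [Option.getD_some]
  constructor
  · rintro ⟨hnd, hl⟩
    refine ⟨(pv_ofList_length_iff bp).mpr (hperm.nodup_iff.mp hnd), ?_⟩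
    rw [hML, ← ham]
    simp only [List.length_cons] at hlen
    omega
  · rintro ⟨hnd, hl⟩
    refine ⟨hperm.nodup_iff.mpr ((pv_ofList_length_iff bp).mp hnd), ?_⟩
    rw [hML, ← ham] at hl
    simp only [List.length_cons] at hlen
    omega

lemma pv_loop_eq (l : List (String × List Int)) : pvALoop l = pvBLoop l := by
  induction l with
  | nil => rfl
  | cons p rest ih =>
    obtain ⟨name, bp⟩ := p
    by_cases h1 : bp.length ≤ 1
    · simp [pvALoop, pvBLoop, h1]
    · have h2 : 2 ≤ bp.length := by omega
      rcases pv_group_iff bp h2 with hiff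
      by_cases hA : pvAInner (PySem.List.sorted bp (fun x => x) false) = true
      · rcases hiff.mp hA with ⟨hlen, hrange⟩
        simp [pvALoop, pvBLoop, h1, hA, hlen, hrange, ih]
      · have hnot : ¬((PySem.Set.ofList bp).length = bp.length ∧
          (PySem.List.max? bp (fun x => x)).getD 0 - (PySem.List.min? bp (fun x => x)).getD 0
            = (bp.length : Int) - 1) := fun hc => hA (hiff.mpr hc)
        by_cases hlen : (PySem.Set.ofList bp).length = bp.length
        · have hrange : (PySem.List.max? bp (fun x => x)).getD 0 - (PySem.List.min? bp (fun x => x)).getD 0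
              ≠ (bp.length : Int) - 1 := fun hr => hnot ⟨hlen, hr⟩
          simp [pvALoop, pvBLoop, h1, hA, hlen, hrange]
        · simp [pvALoop, pvBLoop, h1, hA, hlen]

-- ===== VERDICT (by name: the statement is the Claim_ definition above) =====
theorem output_is_aligned_with_sboxes_spec : Claim_equal_output_is_aligned_with_sboxes := by
  intro l _
  unfold Spec_output_is_aligned_with_sboxes output_is_aligned_with_sboxes output_is_aligned_with_sboxes_alt
  exact pv_loop_eq l
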